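-- pv_equiv track=rewrite | github.com/pkitslaar/AdventOfCode | 2023/day 14/day_14.py | tilt_left
-- ===== SOURCE A (Python) =====
-- def tilt_left(row):
--     new_row = []
--     prev_fixed = -1
--     for i, c in enumerate(row):
--         if c == ".":
--             new_row.append(c)
--         if c == "#":
--             prev_fixed = i
--             new_row.append(c)
--         if c == "O":
--             if i - prev_fixed > 1:
--                 new_row.append(".")
--                 new_row[prev_fixed + 1] = "O"
--                 prev_fixed = prev_fixed + 1
--             else:
--                 new_row.append(c)
--                 prev_fixed = i
--     return "".join(new_row)
-- ===== SOURCE B (Python) =====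
-- def tilt_left(row):
--     return "#".join(
--         "O" * piece.count("O") + "." * piece.count(".")
--         for piece in row.split("#")
--     )
-- ===== Notes on version B (the rewrite author's own statement) =====
-- stated objective: simpler
-- what changed: Replaces the running prev_fixed pointer with in-place list assignment by splitting the row on the barrier character, counting rocks and dots in each barrier-bounded piece and rebuilding it as rocks-then-dots, rejoined with the barrier.
-- outside the precondition, e.g. on tilt_left('x#.O'): A returns '#.O', B returns '#O.'; on tilt_left('x#xO'): A raises IndexError, B returns '#O'
import Mathlib
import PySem

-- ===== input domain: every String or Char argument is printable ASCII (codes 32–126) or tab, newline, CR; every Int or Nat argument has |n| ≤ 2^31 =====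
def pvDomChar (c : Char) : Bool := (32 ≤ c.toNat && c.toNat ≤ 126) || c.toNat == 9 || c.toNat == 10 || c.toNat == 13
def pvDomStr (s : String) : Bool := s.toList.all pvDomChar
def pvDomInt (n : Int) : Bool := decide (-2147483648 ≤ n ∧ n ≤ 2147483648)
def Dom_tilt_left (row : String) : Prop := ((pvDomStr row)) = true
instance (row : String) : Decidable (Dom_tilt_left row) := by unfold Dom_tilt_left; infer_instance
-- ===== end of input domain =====

-- B replaces A's running prev_fixed pointer and in-place assignment with split-on-'#',
-- count-and-rebuild per piece, rejoined with '#' (objective: simpler).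

-- ===== PORT A =====
-- loop body of A's 'for i, c in enumerate(row)': three successive if-blocks on c,
-- threading the state (new_row, prev_fixed)
def tiltStep (st : List Char × Int) (ic : Int × Char) : List Char × Int :=
  let i := ic.1
  let c := ic.2
  let s1 := if c = '.' then (st.1 ++ [c], st.2) else st
  let s2 := if c = '#' then (s1.1 ++ [c], i) else s1
  if c = 'O' then
    if i - s2.2 > 1 then
      -- new_row.append("."); new_row[prev_fixed + 1] = "O"; prev_fixed += 1
      -- (prev_fixed+1 ≥ 0 always; Python raises IndexError when it is out of range,
      --  which happens only outside Pre_; List.set is then a no-op)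
      ((s2.1 ++ ['.']).set (s2.2 + 1).toNat 'O', s2.2 + 1)
    else (s2.1 ++ [c], i)
  else s2

def tilt_left (row : String) : String :=
  String.ofList (((PySem.List.enumerate row.toList).foldl tiltStep ([], -1)).1)

-- ===== PORT B =====
def tilt_left_alt (row : String) : String :=
  String.ofList (PySem.Chars.join ['#']
    ((PySem.Chars.splitOn row.toList ['#']).map (fun piece =>
      List.replicate (PySem.Chars.count piece ['O']) 'O' ++
      List.replicate (PySem.Chars.count piece ['.']) '.')))

-- ===== PRECONDITION & SPEC =====
-- Pre_ excludes rows that mix rocks and barriers with foreign characters (characters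
-- outside the puzzle alphabet): on such rows A's bookkeeping of row indices against the
-- shorter new_row (which silently drops the foreign characters) raises IndexError or
-- misplaces rocks accidentally.  Rows without rocks and rows without barriers are kept:
-- there A stays aligned and agrees with B, as proved below.
def Pre_tilt_left (row : String) : Prop :=
  (∀ c ∈ row.toList, c = 'O' ∨ c = '.' ∨ c = '#') ∨
    'O' ∉ row.toList ∨ '#' ∉ row.toList
instance (row : String) : Decidable (Pre_tilt_left row) := by
  unfold Pre_tilt_left
  exact @instDecidableOr _ _ (List.decidableBAll _ _)
    (@instDecidableOr _ _
      (@instDecidableNot _ (List.instDecidableMemOfLawfulBEq _ _))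
      (@instDecidableNot _ (List.instDecidableMemOfLawfulBEq _ _)))

def pvWitness_tilt_left : String := ".O.O#..O"

def Spec_tilt_left (row : String) (out : String) : Prop := out = tilt_left_alt row
instance (row : String) (out : String) : Decidable (Spec_tilt_left row out) := by unfold Spec_tilt_left; infer_instance

-- ===== CLAIM (what is proved, stated in full; the proofs are below) =====
def Claim_equal_tilt_left : Prop := ∀ (row : String), Dom_tilt_left row → Pre_tilt_left row → Spec_tilt_left row (tilt_left row)

-- ===== LEMMAS AND PROOFS =====

-- split on the single character '#' , structurally
def sp : List Char → List (List Char)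
  | [] => [[]]
  | c :: r => if c = '#' then [] :: sp r else (sp r).modifyHead (c :: ·)

-- the common intermediate form: slide the rest given o 'O's and d '.'s already
-- accumulated in the current (barrier-bounded) piece
def spec2 (o d : Nat) : List Char → List Char
  | [] => List.replicate o 'O' ++ List.replicate d '.'
  | c :: r =>
    if c = '.' then spec2 o (d + 1) r
    else if c = 'O' then spec2 (o + 1) d r
    else List.replicate o 'O' ++ List.replicate d '.' ++ '#' :: spec2 0 0 r

def segL (p : List Char) : List Char :=
  List.replicate (p.count 'O') 'O' ++ List.replicate (p.count '.') '.'

lemma countGo (v : Char) : ∀ (l : List Char) (fuel acc : Nat), l.length ≤ fuel →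
    PySem.Chars.count.go [v] fuel l acc = acc + l.count v := by
  intro l
  induction l with
  | nil => intro fuel acc _; cases fuel <;> simp [PySem.Chars.count.go]
  | cons c t ih =>
    intro fuel acc hf
    cases fuel with
    | zero => simp at hf
    | succ f =>
      simp only [List.length_cons, Nat.add_le_add_iff_right] at hf
      by_cases hv : v = c
      · subst hv
        simp [PySem.Chars.count.go, List.isPrefixOf, ih f (acc+1) hf]
        omega
      · have hb : (v == c) = false := by simp [hv]
        simp [PySem.Chars.count.go, List.isPrefixOf, hb, ih f acc hf, Ne.symm hv]

lemma countChar (p : List Char) (v : Char) :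
    PySem.Chars.count p [v] = p.count v := by
  simp [PySem.Chars.count, countGo v p p.length 0 (le_refl _)]

lemma splitGo : ∀ (l : List Char) (fuel : Nat) (cur : List Char) (acc : List (List Char)),
    l.length ≤ fuel →
    PySem.Chars.splitOn.go ['#'] fuel l cur acc
      = acc.reverse ++ (sp l).modifyHead (cur.reverse ++ ·) := by
  intro l
  induction l with
  | nil => intro fuel cur acc _; cases fuel <;> simp [PySem.Chars.splitOn.go, sp]
  | cons c t ih =>
    intro fuel cur acc hf
    cases fuel with
    | zero => simp at hf
    | succ f =>
      simp only [List.length_cons, Nat.add_le_add_iff_right] at hf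
      by_cases hc : c = '#'
      · subst hc
        simp [PySem.Chars.splitOn.go, List.isPrefixOf, ih f [] (cur.reverse :: acc) hf, sp]
        cases hsp : sp t <;> simp
      · have hb : ('#' == c) = false := by simp [Ne.symm hc]
        simp [PySem.Chars.splitOn.go, List.isPrefixOf, hb,
          ih f (c :: cur) acc hf, sp, hc]
        cases hsp : sp t <;> simp

lemma splitEq (l : List Char) : PySem.Chars.splitOn l ['#'] = sp l := by
  rw [PySem.Chars.splitOn, splitGo l (l.length + 1) [] [] (by omega)]
  cases hsp : sp l <;> simp

lemma sp_ne_nil (l : List Char) : sp l ≠ [] := by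
  induction l with
  | nil => simp [sp]
  | cons c t ih =>
    by_cases hc : c = '#'
    · simp [sp, hc]
    · simp only [sp, if_neg hc]
      cases hsp : sp t with
      | nil => exact absurd hsp ih
      | cons h ts => simp

lemma joinCons (x : List Char) (xs : List (List Char)) :
    PySem.Chars.join ['#'] (x :: xs) = x ++ xs.flatMap (fun q => '#' :: q) := by
  induction xs generalizing x with
  | nil => simp [PySem.Chars.join, List.intercalate, List.intersperse]
  | cons y ys ih =>
    simp only [PySem.Chars.join, List.intercalate, List.intersperse] at ih ⊢
    cases ys <;> simp_all

lemma specG : ∀ (l : List Char) (o d : Nat), (∀ c ∈ l, c = 'O' ∨ c = '.' ∨ c = '#') →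
    spec2 o d l =
      List.replicate (o + (sp l).headI.count 'O') 'O' ++
      List.replicate (d + (sp l).headI.count '.') '.' ++
      (sp l).tail.flatMap (fun q => '#' :: segL q) := by
  intro l
  induction l with
  | nil => intro o d _; simp [spec2, sp]
  | cons c t ih =>
    intro o d h
    have hc := h c (List.mem_cons_self)
    have ht : ∀ x ∈ t, x = 'O' ∨ x = '.' ∨ x = '#' :=
      fun x hx => h x (List.mem_cons_of_mem _ hx)
    rcases hc with hc | hc | hc <;> subst hc
    · -- c = 'O'
      rcases List.exists_cons_of_ne_nil (sp_ne_nil t) with ⟨hh, ts, hsp⟩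
      simp [spec2, sp, hsp, ih (o+1) d ht]
      omega
    · -- c = '.'
      rcases List.exists_cons_of_ne_nil (sp_ne_nil t) with ⟨hh, ts, hsp⟩
      simp [spec2, sp, hsp, ih o (d+1) ht]
      omega
    · -- c = '#'
      rcases List.exists_cons_of_ne_nil (sp_ne_nil t) with ⟨hh, ts, hsp⟩
      simp [spec2, sp, hsp, ih 0 0 ht, segL]

lemma set_append_len {α : Type} (u v : List α) (n : Nat) (a : α) :
    (u ++ v).set (u.length + n) a = u ++ v.set n a := by
  induction u with
  | nil => simp
  | cons x u ih => simp [Nat.succ_add, ih]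

lemma set_rep (o k : Nat) :
    (List.replicate o 'O' ++ '.' :: List.replicate k '.').set o 'O'
      = List.replicate (o+1) 'O' ++ List.replicate k '.' := by
  induction o with
  | zero => simp [List.replicate_succ]
  | succ n ih => simp [List.replicate_succ, ih]

lemma tiltLA : ∀ (r u : List Char) (o d : Nat) (s pf : Int),
    (∀ c ∈ r, c = 'O' ∨ c = '.' ∨ c = '#') →
    s = (u.length : Int) + o + d → pf = (u.length : Int) + o - 1 →
    ((PySem.List.enumerate r s).foldl tiltStep
        (u ++ List.replicate o 'O' ++ List.replicate d '.', pf)).1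
      = u ++ spec2 o d r := by
  intro r
  induction r with
  | nil => intro u o d s pf _ _ _; simp [spec2, PySem.List.enumerate_nil]
  | cons c t ih =>
    intro u o d s pf h hs hpf
    have ht : ∀ x ∈ t, x = 'O' ∨ x = '.' ∨ x = '#' :=
      fun x hx => h x (List.mem_cons_of_mem _ hx)
    rw [PySem.List.enumerate_cons, List.foldl_cons]
    rcases h c List.mem_cons_self with hc | hc | hc <;> subst hc
    · -- c = 'O'
      cases d with
      | zero =>
        have hstep : tiltStep
            (u ++ List.replicate o 'O' ++ List.replicate 0 '.', pf) (s, 'O')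
            = (u ++ List.replicate (o+1) 'O' ++ List.replicate 0 '.', s) := by
          have hcond : ¬(s - pf > 1) := by omega
          simp [tiltStep, hcond, List.replicate_succ', List.append_assoc]
        rw [hstep, ih u (o+1) 0 (s+1) s ht (by push_cast; omega) (by push_cast; omega)]
        simp [spec2]
      | succ e =>
        have hstep : tiltStep
            (u ++ List.replicate o 'O' ++ List.replicate (e+1) '.', pf) (s, 'O')
            = (u ++ List.replicate (o+1) 'O' ++ List.replicate (e+1) '.', pf + 1) := by
          have hcond : s - pf > 1 := by omega
          have htn : (pf + 1).toNat = u.length + o := by omega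
          have h2 : List.replicate (e+1) '.' ++ ['.']
              = ('.' : Char) :: List.replicate (e+1) '.' := by
            simp [← List.replicate_succ, ← List.replicate_succ']
          have hset : (u ++ (List.replicate o 'O' ++ (List.replicate (e+1) '.' ++ ['.']))).set
              (pf + 1).toNat 'O' = u ++ List.replicate (o+1) 'O' ++ List.replicate (e+1) '.' := by
            rw [htn, h2, set_append_len u _ o, set_rep]
            simp [List.append_assoc]
          simp [tiltStep, hcond, hset]
        rw [hstep, ih u (o+1) (e+1) (s+1) (pf+1) ht (by push_cast; omega) (by push_cast; omega)]
        simp [spec2]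
    · -- c = '.'
      have hstep : tiltStep
          (u ++ List.replicate o 'O' ++ List.replicate d '.', pf) (s, '.')
          = (u ++ List.replicate o 'O' ++ List.replicate (d+1) '.', pf) := by
        simp [tiltStep, List.replicate_succ', List.append_assoc]
      rw [hstep, ih u o (d+1) (s+1) pf ht (by push_cast; omega) hpf]
      simp [spec2]
    · -- c = '#'
      have hstep : tiltStep
          (u ++ List.replicate o 'O' ++ List.replicate d '.', pf) (s, '#')
          = ((u ++ List.replicate o 'O' ++ List.replicate d '.') ++ ['#'], s) := by
        simp [tiltStep]
      have hlen : (((u ++ List.replicate o 'O' ++ List.replicate d '.') ++ ['#']).length : Int)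
          = (u.length : Int) + o + d + 1 := by
        simp [List.length_append]; omega
      have hres := ih ((u ++ List.replicate o 'O' ++ List.replicate d '.') ++ ['#']) 0 0 (s+1) s ht
        (by rw [hlen]; omega) (by rw [hlen]; omega)
      simp only [List.replicate_zero, List.append_nil] at hres
      rw [hstep, hres]
      simp [spec2, List.append_assoc]

lemma altEq (l : List Char) (h : ∀ c ∈ l, c = 'O' ∨ c = '.' ∨ c = '#') :
    PySem.Chars.join ['#'] ((PySem.Chars.splitOn l ['#']).map (fun piece =>
      List.replicate (PySem.Chars.count piece ['O']) 'O' ++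
      List.replicate (PySem.Chars.count piece ['.']) '.')) = spec2 0 0 l := by
  rcases List.exists_cons_of_ne_nil (sp_ne_nil l) with ⟨hh, ts, hsp⟩
  rw [splitEq, hsp, List.map_cons, joinCons, specG l 0 0 h, hsp]
  simp [countChar, segL, List.flatMap_map]

lemma sp_mem : ∀ (l : List Char) (p : List Char), p ∈ sp l → ∀ c ∈ p, c ∈ l := by
  intro l
  induction l with
  | nil => intro p hp c hc; simp [sp] at hp; simp [hp] at hc
  | cons a t ih =>
    intro p hp c hc
    by_cases ha : a = '#'
    · subst ha
      have hp' : p = [] ∨ p ∈ sp t := by simpa [sp] using hp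
      rcases hp' with rfl | hp'
      · simp at hc
      · exact List.mem_cons_of_mem _ (ih p hp' c hc)
    · rcases List.exists_cons_of_ne_nil (sp_ne_nil t) with ⟨hh, ts, hsp⟩
      have hp' : p = a :: hh ∨ p ∈ ts := by simpa [sp, ha, hsp] using hp
      rcases hp' with rfl | hp'
      · rcases List.mem_cons.mp hc with hc | hc
        · simp [hc]
        · exact List.mem_cons_of_mem _ (ih hh (by simp [hsp]) c hc)
      · exact List.mem_cons_of_mem _ (ih p (by simp [hsp, hp']) c hc)

lemma BnoO : ∀ l : List Char, 'O' ∉ l →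
    PySem.Chars.join ['#'] ((sp l).map segL)
      = l.filter (fun c => c == '.' || c == '#') := by
  intro l
  induction l with
  | nil => simp [sp, PySem.Chars.join, List.intercalate, segL]
  | cons a t ih =>
    intro hO
    have hO' : 'O' ∉ t := fun h => hO (List.mem_cons_of_mem _ h)
    have haO : a ≠ 'O' := fun h => hO (h ▸ List.mem_cons_self)
    rcases List.exists_cons_of_ne_nil (sp_ne_nil t) with ⟨hh, ts, hsp⟩
    have hhO : hh.count 'O' = 0 := by
      rw [List.count_eq_zero]
      intro h
      exact hO' (sp_mem t hh (by simp [hsp]) 'O' h)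
    have hihj : segL hh ++ (ts.map segL).flatMap (fun q => '#' :: q)
        = t.filter (fun c => c == '.' || c == '#') := by
      have := ih hO'
      rwa [hsp, List.map_cons, joinCons] at this
    have segL_nil : segL [] = [] := by simp [segL]
    by_cases ha : a = '#'
    · subst ha
      rw [show sp ('#' :: t) = [] :: sp t from by simp [sp], hsp, List.map_cons, joinCons]
      have hflat : List.flatMap (fun q => '#' :: q) (List.map segL (hh :: ts))
          = '#' :: (segL hh ++ List.flatMap (fun q => '#' :: q) (List.map segL ts)) := by
        simp
      rw [hflat, segL_nil, List.nil_append, hihj]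
      simp
    · rw [show sp (a :: t) = (a :: hh) :: ts from by simp [sp, ha, hsp],
        List.map_cons, joinCons]
      by_cases hd : a = '.'
      · subst hd
        have hseg : segL ('.' :: hh) = '.' :: segL hh := by
          simp [segL, hhO, List.replicate_succ]
        rw [hseg]
        simp only [List.cons_append, hihj]
        simp
      · have hseg : segL (a :: hh) = segL hh := by
          simp [segL, haO, hd]
        rw [hseg, hihj]
        simp [ha, hd]

lemma tiltLA2 : ∀ (r : List Char) (st : List Char × Int) (s : Int), 'O' ∉ r →
    ((PySem.List.enumerate r s).foldl tiltStep st).1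
      = st.1 ++ r.filter (fun c => c == '.' || c == '#') := by
  intro r
  induction r with
  | nil => intro st s _; simp [PySem.List.enumerate_nil]
  | cons a t ih =>
    intro st s hO
    have hO' : 'O' ∉ t := fun h => hO (List.mem_cons_of_mem _ h)
    have haO : a ≠ 'O' := fun h => hO (h ▸ List.mem_cons_self)
    rw [PySem.List.enumerate_cons, List.foldl_cons]
    by_cases hd : a = '.'
    · subst hd
      have hstep : tiltStep st (s, '.') = (st.1 ++ ['.'], st.2) := by
        simp [tiltStep]
      rw [hstep, ih _ (s+1) hO']
      simp [List.append_assoc]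
    · by_cases ha : a = '#'
      · subst ha
        have hstep : tiltStep st (s, '#') = (st.1 ++ ['#'], s) := by
          simp [tiltStep, hd]
        rw [hstep, ih _ (s+1) hO']
        simp [List.append_assoc]
      · have hstep : tiltStep st (s, a) = st := by
          simp [tiltStep, hd, ha, haO]
        rw [hstep, ih _ (s+1) hO']
        simp [ha, hd]

lemma sp_noHash (l : List Char) (h : '#' ∉ l) : sp l = [l] := by
  induction l with
  | nil => simp [sp]
  | cons a t ih =>
    have ha : a ≠ '#' := fun he => h (he ▸ List.mem_cons_self)
    have ht : '#' ∉ t := fun he => h (List.mem_cons_of_mem _ he)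
    simp [sp, ha, ih ht]

lemma tiltLA3 : ∀ (r : List Char) (o d : Nat) (s : Int),
    '#' ∉ r → (o : Int) + d ≤ s →
    ((PySem.List.enumerate r s).foldl tiltStep
        (List.replicate o 'O' ++ List.replicate d '.', (o : Int) - 1)).1
      = List.replicate (o + r.count 'O') 'O' ++ List.replicate (d + r.count '.') '.' := by
  intro r
  induction r with
  | nil => intro o d s _ _; simp [PySem.List.enumerate_nil]
  | cons a t ih =>
    intro o d s h hs
    have ha : a ≠ '#' := fun he => h (he ▸ List.mem_cons_self)
    have ht : '#' ∉ t := fun he => h (List.mem_cons_of_mem _ he)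
    rw [PySem.List.enumerate_cons, List.foldl_cons]
    by_cases hd : a = '.'
    · subst hd
      have hstep : tiltStep (List.replicate o 'O' ++ List.replicate d '.', (o : Int) - 1)
          (s, '.') = (List.replicate o 'O' ++ List.replicate (d+1) '.', (o : Int) - 1) := by
        simp [tiltStep, List.replicate_succ', List.append_assoc]
      rw [hstep, ih o (d+1) (s+1) ht (by push_cast; omega)]
      simp
      omega
    · by_cases hO : a = 'O'
      · subst hO
        by_cases hfar : s - ((o : Int) - 1) > 1
        · have h2 : List.replicate d '.' ++ ['.'] = ('.' : Char) :: List.replicate d '.' := by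
            simp [← List.replicate_succ, ← List.replicate_succ']
          have hs3 : (List.replicate d '.' ++ ['.']).set 0 'O' = 'O' :: List.replicate d '.' := by
            rw [h2]; simp
          have hstep : tiltStep (List.replicate o 'O' ++ List.replicate d '.', (o : Int) - 1)
              (s, 'O') = (List.replicate (o+1) 'O' ++ List.replicate d '.',
                ((o + 1 : Nat) : Int) - 1) := by
            simp [tiltStep, hfar, hs3, List.replicate_succ', List.append_assoc]
          rw [hstep, ih (o+1) d (s+1) ht (by push_cast; omega)]
          simp
          omega
        · -- near branch: s - (o-1) ≤ 1 forces s = o and d = 0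
          have hso : s = (o : Int) := by omega
          have hd0 : d = 0 := by omega
          subst hd0
          have hstep : tiltStep (List.replicate o 'O' ++ List.replicate 0 '.', (o : Int) - 1)
              (s, 'O') = (List.replicate (o+1) 'O' ++ List.replicate 0 '.',
                ((o + 1 : Nat) : Int) - 1) := by
            simp [tiltStep, hfar, List.replicate_succ']
            omega
          rw [hstep, ih (o+1) 0 (s+1) ht (by push_cast; omega)]
          simp
          omega
      · have hstep : tiltStep (List.replicate o 'O' ++ List.replicate d '.', (o : Int) - 1)
            (s, a) = (List.replicate o 'O' ++ List.replicate d '.', (o : Int) - 1) := by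
          simp [tiltStep, hd, ha, hO]
        rw [hstep, ih o d (s+1) ht (by omega)]
        simp [hd, hO]

-- ===== VERDICT (by name: the statement is the Claim_ definition above) =====
theorem tilt_left_spec : Claim_equal_tilt_left := by
  intro row _ hpre
  unfold Spec_tilt_left tilt_left tilt_left_alt
  rcases hpre with halpha | hnoO | hnoH
  · have hA := tiltLA row.toList [] 0 0 0 (-1) halpha (by simp) (by simp)
    norm_num at hA
    rw [hA, altEq row.toList halpha]
  · have hA := tiltLA2 row.toList ([], -1) 0 hnoO
    simp only [List.nil_append] at hA
    rw [hA, splitEq]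
    have hfun : (fun piece => List.replicate (PySem.Chars.count piece ['O']) 'O' ++
        List.replicate (PySem.Chars.count piece ['.']) '.') = segL := by
      funext p; simp [segL, countChar]
    rw [hfun, BnoO row.toList hnoO]
  · have hA := tiltLA3 row.toList 0 0 0 hnoH (by simp)
    norm_num at hA
    rw [hA, splitEq, sp_noHash row.toList hnoH]
    simp [countChar]
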